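-- pv_equiv track=rewrite | github.com/bhargavasatyamani/data-structures-and-algorithms | sorting/three_number_sort.py | threeNumberSort_solution1
-- ===== SOURCE A (Python) =====
-- def threeNumberSort_solution1(array, order):
--     # This has time complexity of O(n*3)
-- 	currentIdx = 0
-- 	for x in order:
-- 		swapped = True
-- 		while swapped:
-- 			swapped = False
-- 			for i in range(currentIdx, len(array)-1):
-- 				if array[i] == x:
-- 					continue
-- 				elif array[i+1] == x:
-- 					array[i], array[i+1] = array[i+1], array[i]
-- 					swapped = True
-- 				else:
-- 					continue
-- 		for i in range(currentIdx, len(array)):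
-- 			if array[i] != x:
-- 				currentIdx = i
-- 				break
--
-- 	return array
-- ===== SOURCE B (Python) =====
-- def threeNumberSort_solution1(array, order):
--     # Counting sort: one pass to count, one pass to rebuild (A's return value is
--     # built in a fresh list; A also reorders `array` in place, B does not mutate it).
--     counts = {}
--     for v in array:
--         counts[v] = counts.get(v, 0) + 1
--     result = []
--     seen = set()
--     for x in order:
--         if x not in seen:
--             seen.add(x)
--             result += [x] * counts.get(x, 0)
--     for v in array:
--         if v not in seen:
--             result.append(v)
--     return result
-- ===== Notes on version B (the rewrite author's own statement) =====
-- stated objective: faster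
-- what changed: Replaced A's repeated bubble passes per order value (quadratic swapping) by a counting sort: one pass builds a value->count dictionary, the output is rebuilt as count-many copies of each distinct order value in order followed by the remaining elements in original order.
import Mathlib
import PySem

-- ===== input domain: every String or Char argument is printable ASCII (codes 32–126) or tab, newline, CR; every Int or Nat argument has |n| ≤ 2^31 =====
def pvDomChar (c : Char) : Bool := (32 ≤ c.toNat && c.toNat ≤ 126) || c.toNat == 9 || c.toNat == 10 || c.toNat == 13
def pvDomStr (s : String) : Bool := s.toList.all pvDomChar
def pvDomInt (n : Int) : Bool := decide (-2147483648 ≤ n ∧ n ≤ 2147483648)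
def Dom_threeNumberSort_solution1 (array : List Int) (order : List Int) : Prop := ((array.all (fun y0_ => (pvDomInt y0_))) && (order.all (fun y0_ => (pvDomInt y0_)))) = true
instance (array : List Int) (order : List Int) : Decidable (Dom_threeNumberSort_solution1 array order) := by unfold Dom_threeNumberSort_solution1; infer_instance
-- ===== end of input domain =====

-- B replaces A's repeated bubbling passes by a counting sort (count each value once, rebuild the
-- output in order-value order, leftovers keep their original order); the equivalence is about the
-- RETURN value only: the Python A also reorders `array` in place, while B does not mutate it.

-- ===== PORT A =====
def pvMu (x : Int) : List Int → Nat
  | [] => 0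
  | _ :: t => pvMu x t + t.count x

def pvPass (x : Int) : List Int → List Int × Bool
  | a :: b :: rest =>
    if a = x then
      let p := pvPass x (b :: rest); (a :: p.1, p.2)
    else if b = x then
      let p := pvPass x (a :: rest); (b :: p.1, true)
    else
      let p := pvPass x (b :: rest); (a :: p.1, p.2)
  | l => (l, false)
termination_by l => l.length

theorem pvMu_cons (x a : Int) (t : List Int) : pvMu x (a :: t) = pvMu x t + t.count x := rfl

theorem pvPass_eq1 (x b : Int) (rest : List Int) :
    pvPass x (x :: b :: rest) = (x :: (pvPass x (b :: rest)).1, (pvPass x (b :: rest)).2) := by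
  simp [pvPass]
theorem pvPass_eq2 (x a : Int) (rest : List Int) (ha : ¬ a = x) :
    pvPass x (a :: x :: rest) = (x :: (pvPass x (a :: rest)).1, true) := by
  simp [pvPass, ha]
theorem pvPass_eq3 (x a b : Int) (rest : List Int) (ha : ¬ a = x) (hb : ¬ b = x) :
    pvPass x (a :: b :: rest) = (a :: (pvPass x (b :: rest)).1, (pvPass x (b :: rest)).2) := by
  simp [pvPass, ha, hb]

theorem pvPass_short (x : Int) (l : List Int) (h : l.length ≤ 1) : pvPass x l = (l, false) := by
  rcases l with _ | ⟨a, _ | ⟨b, t⟩⟩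
  · simp [pvPass]
  · simp [pvPass]
  · simp at h

theorem pvPass_count (x y : Int) (l : List Int) : ((pvPass x l).1).count y = l.count y := by
  induction l using pvPass.induct x with
  | case1 b rest ih => rw [pvPass_eq1]; simp [List.count_cons, ih]
  | case2 a rest ha ih => rw [pvPass_eq2 x a rest ha]; simp [List.count_cons, ih]; omega
  | case3 a b rest ha hb ih => rw [pvPass_eq3 x a b rest ha hb]; simp [List.count_cons, ih]
  | case4 l h =>
    rcases l with _ | ⟨a, _ | ⟨b, t⟩⟩
    · rw [pvPass_short x _ (by simp)]
    · rw [pvPass_short x _ (by simp)]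
    · exact (h a b t rfl).elim

theorem pvPass_mu_le (x : Int) (l : List Int) : pvMu x (pvPass x l).1 ≤ pvMu x l := by
  induction l using pvPass.induct x with
  | case1 b rest ih =>
    rw [pvPass_eq1]
    simp only [pvMu_cons, pvPass_count] at *
    omega
  | case2 a rest ha ih =>
    rw [pvPass_eq2 x a rest ha]
    simp only [pvMu_cons, pvPass_count, List.count_cons] at *
    simp [ha] at *
    omega
  | case3 a b rest ha hb ih =>
    rw [pvPass_eq3 x a b rest ha hb]
    simp only [pvMu_cons, pvPass_count] at *
    omega
  | case4 l h =>
    rcases l with _ | ⟨a, _ | ⟨b, t⟩⟩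
    · simp [pvPass]
    · simp [pvPass]
    · exact (h a b t rfl).elim

theorem pvPass_mu_lt (x : Int) (l : List Int) (h : (pvPass x l).2 = true) :
    pvMu x (pvPass x l).1 < pvMu x l := by
  induction l using pvPass.induct x with
  | case1 b rest ih =>
    rw [pvPass_eq1] at *
    simp only [pvMu_cons, pvPass_count] at *
    have := ih h
    omega
  | case2 a rest ha ih =>
    have hle := pvPass_mu_le x (a :: rest)
    rw [pvPass_eq2 x a rest ha]
    simp only [pvMu_cons, pvPass_count, List.count_cons] at *
    simp [ha] at *
    omega
  | case3 a b rest ha hb ih =>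
    rw [pvPass_eq3 x a b rest ha hb] at *
    simp only [pvMu_cons, pvPass_count] at *
    have := ih h
    omega
  | case4 l hl =>
    rcases l with _ | ⟨a, _ | ⟨b, t⟩⟩
    · simp [pvPass] at h
    · simp [pvPass] at h
    · exact (hl a b t rfl).elim

def pvBubble (x : Int) (l : List Int) : List Int :=
  match h : pvPass x l with
  | (l', false) => l'
  | (l', true) => pvBubble x l'
termination_by pvMu x l
decreasing_by
  have hlt := pvPass_mu_lt x l (by rw [h])
  rw [h] at hlt
  exact hlt

def pvNewIdx (x : Int) (a : List Int) (c : Nat) : Nat :=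
  match (a.drop c).findIdx? (fun v => v ≠ x) with
  | some j => c + j
  | none => c

def threeNumberSort_solution1 (array : List Int) (order : List Int) : List Int :=
  (order.foldl (fun (st : List Int × Nat) x =>
      let a' := st.1.take st.2 ++ pvBubble x (st.1.drop st.2)
      (a', pvNewIdx x a' st.2))
    (array, 0)).1

-- ===== PORT B =====
def threeNumberSort_solution1_alt (array : List Int) (order : List Int) : List Int :=
  let counts : PySem.Dict Int Int :=
    array.foldl (fun d v => d.insert v (d.getD v 0 + 1)) PySem.Dict.empty
  let st : List Int × PySem.Set Int :=
    order.foldl (fun st x =>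
      if PySem.Set.contains st.2 x then st
      else (st.1 ++ List.replicate (counts.getD x 0).toNat x, PySem.Set.add st.2 x))
    ([], PySem.Set.empty)
  st.1 ++ array.filter (fun v => !(PySem.Set.contains st.2 v))

-- ===== PRECONDITION & SPEC =====
def Spec_threeNumberSort_solution1 (array : List Int) (order : List Int) (out : List Int) : Prop := out = threeNumberSort_solution1_alt array order
instance (array : List Int) (order : List Int) (out : List Int) : Decidable (Spec_threeNumberSort_solution1 array order out) := by unfold Spec_threeNumberSort_solution1; infer_instance

-- ===== CLAIM (what is proved, stated in full; the proofs are below) =====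
def Claim_equal_threeNumberSort_solution1 : Prop := ∀ (array : List Int) (order : List Int), Dom_threeNumberSort_solution1 array order → Spec_threeNumberSort_solution1 array order (threeNumberSort_solution1 array order)

-- ===== LEMMAS AND PROOFS =====
theorem pvPass_filter (x : Int) (l : List Int) :
    ((pvPass x l).1).filter (fun v => v ≠ x) = l.filter (fun v => v ≠ x) := by
  induction l using pvPass.induct x with
  | case1 b rest ih => rw [pvPass_eq1]; by_cases hbx : b = x <;> simp_all [List.filter_cons]
  | case2 a rest ha ih =>
    rw [pvPass_eq2 x a rest ha]
    simp_all [List.filter_cons]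
  | case3 a b rest ha hb ih =>
    rw [pvPass_eq3 x a b rest ha hb]
    simp_all [List.filter_cons]
  | case4 l h =>
    rcases l with _ | ⟨a, _ | ⟨b, t⟩⟩
    · rw [pvPass_short x _ (by simp)]
    · rw [pvPass_short x _ (by simp)]
    · exact (h a b t rfl).elim

theorem pvPass_false_fix (x : Int) (l : List Int) (h : (pvPass x l).2 = false) :
    (pvPass x l).1 = l := by
  induction l using pvPass.induct x with
  | case1 b rest ih => rw [pvPass_eq1] at *; simp at *; exact ih h
  | case2 a rest ha ih => rw [pvPass_eq2 x a rest ha] at h; simp at h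
  | case3 a b rest ha hb ih => rw [pvPass_eq3 x a b rest ha hb] at *; simp at *; exact ih h
  | case4 l hl =>
    rcases l with _ | ⟨a, _ | ⟨b, t⟩⟩
    · rw [pvPass_short x _ (by simp)]
    · rw [pvPass_short x _ (by simp)]
    · exact (hl a b t rfl).elim

theorem pvPass_false_form (x : Int) (l : List Int) (h : (pvPass x l).2 = false) :
    l = List.replicate (l.count x) x ++ l.filter (fun v => v ≠ x) := by
  induction l using pvPass.induct x with
  | case1 b rest ih =>
    rw [pvPass_eq1] at h; simp at h
    have h2 := ih h
    conv_lhs => rw [h2]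
    simp [List.count_cons, List.filter_cons, List.replicate_succ]
  | case2 a rest ha ih => rw [pvPass_eq2 x a rest ha] at h; simp at h
  | case3 a b rest ha hb ih =>
    rw [pvPass_eq3 x a b rest ha hb] at h; simp at h
    have hform := ih h
    have hcnt : (b :: rest).count x = 0 := by
      by_contra hc
      rcases Nat.exists_eq_succ_of_ne_zero hc with ⟨k, hk⟩
      rw [hk] at hform
      simp [List.replicate_succ] at hform
      exact hb hform.1
    have hnotmem : x ∉ (a :: b :: rest) := by
      rw [List.count_eq_zero] at hcnt
      simp only [List.mem_cons, not_or] at *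
      exact ⟨fun hax => ha hax.symm, hcnt⟩
    have hcnt2 : (a :: b :: rest).count x = 0 := List.count_eq_zero.mpr hnotmem
    rw [hcnt2]
    simp only [List.replicate_zero, List.nil_append]
    rw [List.filter_eq_self.mpr ?_]
    intro v hv
    exact decide_eq_true (fun hvx => hnotmem (hvx ▸ hv))
  | case4 l hl =>
    rcases l with _ | ⟨a, _ | ⟨b, t⟩⟩
    · simp
    · by_cases hax : a = x <;> simp [List.count_cons, hax, List.filter_cons]
    · exact (hl a b t rfl).elim

theorem pvBubble_eq (x : Int) (l : List Int) :
    pvBubble x l = List.replicate (l.count x) x ++ l.filter (fun v => v ≠ x) := by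
  induction l using pvBubble.induct x with
  | case1 l l' h =>
    rw [pvBubble, h]
    have h2 : (pvPass x l).2 = false := by rw [h]
    have h1 : (pvPass x l).1 = l' := by rw [h]
    rw [← h1]
    rw [pvPass_false_fix x l h2]
    exact pvPass_false_form x l h2
  | case2 l l' h ih =>
    rw [pvBubble, h]
    have h1 : (pvPass x l).1 = l' := by rw [h]
    show pvBubble x l' = _
    rw [ih, ← h1, pvPass_count, pvPass_filter]

def pvBS (orig : List Int) : List Int → List Int → List Int
  | _, [] => []
  | seen, x :: t =>
    (if seen.contains x then [] else List.replicate (orig.count x) x) ++ pvBS orig (x :: seen) t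

def pvRest (orig p : List Int) : List Int := orig.filter (fun v => !(p.contains v))

def pvInv (S r : List Int) (c : Nat) : Prop :=
  (r ≠ [] ∧ c = S.length) ∨ (r = [] ∧ c ≤ S.length ∧ ∃ n w, S.drop c = List.replicate n w)

-- findIdx? facts

theorem pvFindIdx_replicate_none (x : Int) (n : Nat) :
    (List.replicate n x).findIdx? (fun v => v ≠ x) = none := by
  induction n with
  | zero => rfl
  | succ n ih => simp [List.replicate_succ, List.findIdx?_cons, ih]

theorem pvFindIdx_replicate_append (x : Int) (n : Nat) (l : List Int)
    (hl : l ≠ []) (hall : ∀ v ∈ l, v ≠ x) :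
    (List.replicate n x ++ l).findIdx? (fun v => v ≠ x) = some n := by
  induction n with
  | zero =>
    rcases l with _ | ⟨a, t⟩
    · exact absurd rfl hl
    · simp [List.findIdx?_cons, hall a List.mem_cons_self]
  | succ n ih =>
    rw [List.replicate_succ, List.cons_append, List.findIdx?_cons]
    rw [if_neg (by simp), ih]
    rfl

theorem pvNewIdx_const (x : Int) (a : List Int) (c : Nat) (n : Nat) (w : Int)
    (hd : a.drop c = List.replicate n w) : pvNewIdx x a c = c := by
  unfold pvNewIdx
  rw [hd]
  by_cases hw : w = x
  · rw [hw, pvFindIdx_replicate_none]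
  · cases n with
    | zero => rfl
    | succ n =>
      rw [List.replicate_succ, List.findIdx?_cons]
      simp [hw]

theorem pvRest_cons (orig : List Int) (x : Int) (seen : List Int) :
    pvRest orig (x :: seen) = (pvRest orig seen).filter (fun v => v ≠ x) := by
  unfold pvRest
  rw [List.filter_filter]
  apply List.filter_congr
  intro v _
  simp [List.contains_cons]

theorem pvRest_count (orig seen : List Int) (x : Int) :
    (pvRest orig seen).count x
      = if seen.contains x then 0 else orig.count x := by
  by_cases hx : seen.contains x = true
  · simp only [hx, if_true]
    rw [List.count_eq_zero]
    intro hmem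
    have := List.of_mem_filter hmem
    simp [hx] at this
    exact this (by simpa using hx)
  · simp only [hx, if_false]
    apply List.count_filter
    simpa using hx

theorem pvBlock_eq (orig seen : List Int) (x : Int) :
    List.replicate ((pvRest orig seen).count x) x
      = (if seen.contains x then [] else List.replicate (orig.count x) x) := by
  rw [pvRest_count]
  by_cases hx : x ∈ seen
  · simp [List.contains_eq_mem, hx]
  · simp [List.contains_eq_mem, hx]

theorem pvStep (orig seen : List Int) (x : Int) (S : List Int) (c : Nat)
    (hInv : pvInv S (pvRest orig seen) c) :
    (S ++ pvRest orig seen).take c ++ pvBubble x ((S ++ pvRest orig seen).drop c)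
      = (S ++ (if seen.contains x then [] else List.replicate (orig.count x) x)) ++ pvRest orig (x :: seen)
    ∧ pvInv (S ++ (if seen.contains x then [] else List.replicate (orig.count x) x))
        (pvRest orig (x :: seen))
        (pvNewIdx x ((S ++ (if seen.contains x then [] else List.replicate (orig.count x) x)) ++ pvRest orig (x :: seen)) c) := by
  have hr' : pvRest orig (x :: seen) = (pvRest orig seen).filter (fun v => v ≠ x) :=
    pvRest_cons orig x seen
  have hB' : (if seen.contains x then [] else List.replicate (orig.count x) x)
      = List.replicate ((pvRest orig seen).count x) x := (pvBlock_eq orig seen x).symm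
  rcases hInv with ⟨hne, hc⟩ | ⟨hnil, hc, n, w, hdrop⟩
  · -- r ≠ [], c = S.length
    subst hc
    have ha : (S ++ pvRest orig seen).take S.length ++ pvBubble x ((S ++ pvRest orig seen).drop S.length)
        = (S ++ (if seen.contains x then [] else List.replicate (orig.count x) x)) ++ pvRest orig (x :: seen) := by
      rw [List.take_left, List.drop_left, pvBubble_eq, hr', hB', List.append_assoc]
    refine ⟨ha, ?_⟩
    by_cases hre : (pvRest orig seen).filter (fun v => v ≠ x) = []
    · right
      have hdr : ((S ++ (if seen.contains x then [] else List.replicate (orig.count x) x)) ++ pvRest orig (x :: seen)).drop S.length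
          = List.replicate ((pvRest orig seen).count x) x := by
        rw [hr', hre, List.append_nil, hB', List.drop_left]
      have hidx : pvNewIdx x ((S ++ (if seen.contains x then [] else List.replicate (orig.count x) x)) ++ pvRest orig (x :: seen)) S.length = S.length :=
        pvNewIdx_const x _ _ _ _ hdr
      rw [hidx, hr', hre]
      refine ⟨rfl, by simp, (pvRest orig seen).count x, x, ?_⟩
      rw [hB', List.drop_left]
    · left
      refine ⟨by rw [hr']; exact hre, ?_⟩
      have hall : ∀ v ∈ (pvRest orig seen).filter (fun v => v ≠ x), v ≠ x := by
        intro v hv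
        have := List.of_mem_filter hv
        simpa using this
      have hdr : ((S ++ (if seen.contains x then [] else List.replicate (orig.count x) x)) ++ pvRest orig (x :: seen)).drop S.length
          = List.replicate ((pvRest orig seen).count x) x ++ (pvRest orig seen).filter (fun v => v ≠ x) := by
        rw [List.append_assoc, List.drop_left, hB', hr']
      unfold pvNewIdx
      rw [hdr, pvFindIdx_replicate_append x _ _ hre hall]
      rw [List.length_append, hB', List.length_replicate]
  · -- r = []: array is S, suffix from c constant
    have hallseen : ∀ v ∈ orig, seen.contains v = true := by
      intro v hv
      by_contra hcv
      have hm : v ∈ pvRest orig seen := List.mem_filter.mpr ⟨hv, by simpa using hcv⟩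
      rw [hnil] at hm
      simp at hm
    have hBnil : (if seen.contains x then [] else List.replicate (orig.count x) x) = ([] : List Int) := by
      by_cases hx : seen.contains x = true
      · rw [if_pos hx]
      · have hcz : orig.count x = 0 := by
          rw [List.count_eq_zero]
          intro hmem
          exact hx (hallseen x hmem)
        rw [if_neg hx, hcz]
        rfl
    have hr'nil : pvRest orig (x :: seen) = [] := by
      rw [hr', hnil]
      rfl
    have hbb : pvBubble x (S.drop c) = S.drop c := by
      rw [hdrop, pvBubble_eq]
      by_cases hw : w = x
      · subst hw
        simp [List.count_replicate, List.filter_eq_nil_iff]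
      · rw [List.count_replicate, if_neg (by simpa using hw)]
        rw [List.filter_eq_self.mpr (by intro v hv; simp at hv ⊢; rw [hv.2]; exact hw)]
        rfl
    have ha : (S ++ pvRest orig seen).take c ++ pvBubble x ((S ++ pvRest orig seen).drop c)
        = (S ++ (if seen.contains x then [] else List.replicate (orig.count x) x)) ++ pvRest orig (x :: seen) := by
      rw [hnil, hBnil, hr'nil]
      simp only [List.append_nil]
      rw [hbb, List.take_append_drop]
    refine ⟨ha, ?_⟩
    right
    have hidx : pvNewIdx x ((S ++ (if seen.contains x then [] else List.replicate (orig.count x) x)) ++ pvRest orig (x :: seen)) c = c := by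
      apply pvNewIdx_const x _ _ n w
      rw [hBnil, hr'nil]
      simp only [List.append_nil]
      exact hdrop
    rw [hidx, hBnil, hr'nil]
    simp only [List.append_nil]
    exact ⟨by simp, hc, n, w, hdrop⟩

theorem pvLoopA (orig : List Int) (t : List Int) : ∀ (seen S : List Int) (c : Nat),
    pvInv S (pvRest orig seen) c →
    (t.foldl (fun (st : List Int × Nat) x =>
        let a' := st.1.take st.2 ++ pvBubble x (st.1.drop st.2)
        (a', pvNewIdx x a' st.2))
      (S ++ pvRest orig seen, c)).1
      = S ++ pvBS orig seen t ++ pvRest orig (t.reverse ++ seen) := by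
  induction t with
  | nil =>
    intro seen S c _
    simp [pvBS]
  | cons x t ih =>
    intro seen S c hInv
    rw [List.foldl_cons]
    have hstep := pvStep orig seen x S c hInv
    have harg :
        (S ++ pvRest orig seen).take c ++ pvBubble x ((S ++ pvRest orig seen).drop c)
          = (S ++ (if seen.contains x then [] else List.replicate (orig.count x) x)) ++ pvRest orig (x :: seen) :=
      hstep.1
    show (t.foldl _ ((S ++ pvRest orig seen).take c ++ pvBubble x ((S ++ pvRest orig seen).drop c),
        pvNewIdx x ((S ++ pvRest orig seen).take c ++ pvBubble x ((S ++ pvRest orig seen).drop c)) c)).1 = _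
    rw [harg]
    rw [ih (x :: seen) (S ++ (if seen.contains x then [] else List.replicate (orig.count x) x)) _ hstep.2]
    show (S ++ _) ++ pvBS orig (x :: seen) t ++ pvRest orig (t.reverse ++ (x :: seen))
        = S ++ pvBS orig seen (x :: t) ++ pvRest orig ((x :: t).reverse ++ seen)
    have hrev : (x :: t).reverse ++ seen = t.reverse ++ (x :: seen) := by
      rw [List.reverse_cons, List.append_assoc]
      rfl
    rw [hrev]
    have hbs : pvBS orig seen (x :: t)
        = (if seen.contains x then [] else List.replicate (orig.count x) x) ++ pvBS orig (x :: seen) t := rfl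
    rw [hbs]
    simp [List.append_assoc]

-- pvBS only depends on the membership of `seen`

theorem pvBS_congr (orig : List Int) (t : List Int) : ∀ (s1 s2 : List Int),
    (∀ y, s1.contains y = s2.contains y) → pvBS orig s1 t = pvBS orig s2 t := by
  induction t with
  | nil => intro s1 s2 _; rfl
  | cons x t ih =>
    intro s1 s2 h
    show (if s1.contains x then _ else _) ++ _ = (if s2.contains x then _ else _) ++ _
    rw [h x, ih (x :: s1) (x :: s2) (by intro y; rw [List.contains_cons, List.contains_cons, h y])]

theorem pvLoopB (array : List Int) (counts : PySem.Dict Int Int)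
    (hcounts : ∀ y, counts.getD y 0 = (array.count y : Int))
    (t : List Int) : ∀ (res : List Int) (seen : PySem.Set Int),
    (t.foldl (fun (st : List Int × PySem.Set Int) x =>
        if PySem.Set.contains st.2 x then st
        else (st.1 ++ List.replicate (counts.getD x 0).toNat x, PySem.Set.add st.2 x))
      (res, seen))
      = (res ++ pvBS array seen t,
         (t.foldl (fun (st : List Int × PySem.Set Int) x =>
            if PySem.Set.contains st.2 x then st
            else (st.1 ++ List.replicate (counts.getD x 0).toNat x, PySem.Set.add st.2 x))
          (res, seen)).2)
    ∧ (∀ y, ((t.foldl (fun (st : List Int × PySem.Set Int) x =>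
            if PySem.Set.contains st.2 x then st
            else (st.1 ++ List.replicate (counts.getD x 0).toNat x, PySem.Set.add st.2 x))
          (res, seen)).2).contains y = (seen.contains y || t.contains y)) := by
  induction t with
  | nil =>
    intro res seen
    refine ⟨by simp [pvBS], ?_⟩
    intro y
    simp [PySem.Set.contains]
  | cons x t ih =>
    intro res seen
    rw [List.foldl_cons]
    by_cases hx : PySem.Set.contains seen x = true
    · rw [if_pos hx]
      rcases ih res seen with ⟨h1, h2⟩
      constructor
      · rw [h1]
        have : pvBS array seen t = pvBS array seen (x :: t) := by
          show _ = (if seen.contains x then _ else _) ++ _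
          rw [hx, if_pos rfl, List.nil_append]
          exact pvBS_congr array t seen (x :: seen)
            (by intro y; by_cases hyx : y = x
                · subst hyx; simp [List.contains_cons, hx, PySem.Set.contains] at *; simp [hx]
                · simp [List.contains_cons, hyx])
        rw [← this]
      · intro y
        rw [h2 y]
        by_cases hyx : y = x
        · subst hyx
          simp [PySem.Set.contains] at hx
          simp [List.contains_cons, hx, PySem.Set.contains]
        · simp [List.contains_cons, hyx]
    · rw [if_neg hx]
      have hadd : PySem.Set.add seen x = seen ++ [x] := by
        unfold PySem.Set.add
        rw [if_neg hx]
      rcases ih (res ++ List.replicate (counts.getD x 0).toNat x) (PySem.Set.add seen x) with ⟨h1, h2⟩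
      constructor
      · rw [h1]
        have hbs : pvBS array seen (x :: t)
            = (if seen.contains x then [] else List.replicate (array.count x) x) ++ pvBS array (x :: seen) t := rfl
        rw [hbs, if_neg hx]
        have hrep : List.replicate ((counts.getD x 0).toNat) x = List.replicate (array.count x) x := by
          rw [hcounts x]
          simp
        rw [hrep]
        have hcong : pvBS array (PySem.Set.add seen x) t = pvBS array (x :: seen) t := by
          apply pvBS_congr
          intro y
          rw [hadd]
          simp [List.contains_cons]
          exact Bool.or_comm _ _
        rw [hcong, List.append_assoc]
      · intro y
        rw [h2 y, hadd]
        by_cases hyx : y = x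
        · subst hyx
          simp [List.contains_cons, PySem.Set.contains]
        · simp [List.contains_cons, hyx, PySem.Set.contains]

theorem pvMain (array order : List Int) :
    threeNumberSort_solution1 array order = threeNumberSort_solution1_alt array order := by
  unfold threeNumberSort_solution1 threeNumberSort_solution1_alt
  simp only []
  -- A side
  have hrest0 : pvRest array [] = array := by
    unfold pvRest
    simp
  have hInv0 : pvInv ([] : List Int) (pvRest array []) 0 := by
    rw [hrest0]
    rcases array with _ | ⟨a, t⟩
    · exact Or.inr ⟨rfl, Nat.le_refl 0, 0, 0, rfl⟩
    · exact Or.inl ⟨by simp, rfl⟩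
  have hA := pvLoopA array order [] [] 0 hInv0
  rw [hrest0] at hA
  rw [List.nil_append] at hA
  rw [hA]
  -- B side
  have hcounts : ∀ y, (array.foldl (fun d v => d.insert v (d.getD v 0 + 1)) PySem.Dict.empty).getD y 0
      = (array.count y : Int) := by
    intro y
    rw [PySem.Dict.foldl_insert_getD_add_one_eq_counter, PySem.Dict.getD_counter]
  have hB := pvLoopB array _ hcounts order [] PySem.Set.empty
  rw [hB.1]
  simp only [List.nil_append]
  congr 1
  -- leftover parts agree
  unfold pvRest
  apply List.filter_congr
  intro v _
  have h2 := hB.2 v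
  rw [h2]
  have hemp : (PySem.Set.empty : PySem.Set Int).contains v = false := rfl
  rw [hemp, Bool.false_or]
  congr 1
  rw [List.contains_eq_mem, List.contains_eq_mem]
  simp [List.mem_reverse]

-- ===== VERDICT (by name: the statement is the Claim_ definition above) =====
theorem threeNumberSort_solution1_spec : Claim_equal_threeNumberSort_solution1 := by
  intro array order _
  unfold Spec_threeNumberSort_solution1
  exact pvMain array order
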